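-- pv_equiv track=rewrite | github.com/woshiliyuan/learnPython | leetCode/topic/04dynamic/回文和公共子串/4_1_300_intercept.py | findMax0
-- ===== SOURCE A (Python) =====
-- def findMax0(array):
--     length = len(array)
--     # 第一枚应该拦截的导弹位置, 最多能拦截几个
--     firstIndex,maxNum,maxNums = length - 1,1,[1] * length
--     for i in range(length - 2,-1,-1):
--         # 找到(i, length-1)中与maxNum[i]差距最小的那个高度
--         for j in range(i,length):
--             if array[j] < array[i] and maxNums[j] >= maxNums[i]:
--                 maxNums[i] = maxNums[j] + 1
--
--         if maxNums[i] > maxNum: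
--             maxNum = maxNums[i]
--             firstIndex = i
--
--     # 输出最大递减序列
--     answer = [array[firstIndex]]
--     last_index = firstIndex
--     for i in range(last_index + 1,length):
--         if array[i] < answer[-1] and maxNums[i] == maxNums[last_index] - 1:
--             answer.append(array[i])
--             last_index = i
--     return answer
-- ===== SOURCE B (Python) =====
-- import bisect
--
-- def findMax0(array):
--     n = len(array)
--     # f[i] = length of the longest strictly decreasing subsequence starting at i,
--     # computed right-to-left with a patience-style 'tails' array:
--     # tails[l-1] = smallest value among already-processed elements whose f-value is >= l.
--     tails = []
--     f = [0] * n
--     for i in range(n - 1, -1, -1):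
--         pos = bisect.bisect_left(tails, array[i])
--         f[i] = pos + 1
--         if pos == len(tails):
--             tails.append(array[i])
--         else:
--             tails[pos] = array[i]
--     # first index of the maximal f-value, scanning right-to-left with strict improvement
--     best = n - 1
--     for i in range(n - 2, -1, -1):
--         if f[i] > f[best]:
--             best = i
--     # greedy reconstruction of one optimal sequence
--     answer = [array[best]]
--     last = best
--     for i in range(best + 1, n):
--         if array[i] < answer[-1] and f[i] == f[last] - 1:
--             answer.append(array[i])
--             last = i
--     return answer
-- ===== Notes on version B (the rewrite author's own statement) =====
-- stated objective: faster
-- what changed: Replaces the O(n^2) nested-loop DP (for each i rescan the whole suffix to grow maxNums[i]) by a right-to-left patience-style DP that keeps a sorted 'tails' array of minimal values per subsequence length and finds each f[i] with one binary search (bisect_left), followed by the same selection and greedy reconstruction.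
import Mathlib
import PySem

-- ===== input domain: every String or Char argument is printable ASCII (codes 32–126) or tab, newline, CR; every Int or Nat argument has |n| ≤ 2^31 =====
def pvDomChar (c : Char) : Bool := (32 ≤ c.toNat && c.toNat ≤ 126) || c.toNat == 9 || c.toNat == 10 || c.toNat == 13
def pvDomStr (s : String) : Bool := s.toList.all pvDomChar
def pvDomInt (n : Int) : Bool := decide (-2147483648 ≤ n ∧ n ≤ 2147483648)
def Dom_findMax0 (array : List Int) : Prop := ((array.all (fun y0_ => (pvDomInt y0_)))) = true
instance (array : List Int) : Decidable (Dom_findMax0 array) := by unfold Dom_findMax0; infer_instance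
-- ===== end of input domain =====

-- B replaces A's O(n^2) nested-loop DP by a patience-style DP with binary search (O(n log n));
-- both raise IndexError on the empty list, which Pre_ excludes.

-- ===== PORT A =====
def innerStepA (array : List Int) (i : Int) (mns : List Int) (j : Int) : List Int :=
  if PySem.List.pyGetD array j 0 < PySem.List.pyGetD array i 0 ∧
     PySem.List.pyGetD mns j 0 ≥ PySem.List.pyGetD mns i 0 then
    PySem.List.pySetD mns i (PySem.List.pyGetD mns j 0 + 1)
  else mns

def outerStepA (array : List Int) (st : List Int × Int × Int) (i : Int) : List Int × Int × Int :=
  let maxNums := (PySem.List.pyRange i (array.length : Int) 1).foldl (innerStepA array i) st.1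
  if PySem.List.pyGetD maxNums i 0 > st.2.1 then (maxNums, PySem.List.pyGetD maxNums i 0, i)
  else (maxNums, st.2.1, st.2.2)

def greedyStepA (array maxNums : List Int) (st : List Int × Int) (i : Int) : List Int × Int :=
  if PySem.List.pyGetD array i 0 < PySem.List.pyGetD st.1 (-1) 0 ∧
     PySem.List.pyGetD maxNums i 0 = PySem.List.pyGetD maxNums st.2 0 - 1 then
    (st.1 ++ [PySem.List.pyGetD array i 0], i)
  else (st.1, st.2)

def findMax0 (array : List Int) : List Int :=
  let length : Int := (array.length : Int)
  let st := (PySem.List.pyRange (length - 2) (-1) (-1)).foldl (outerStepA array)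
              (List.replicate array.length 1, 1, length - 1)
  let res := (PySem.List.pyRange (st.2.2 + 1) length 1).foldl (greedyStepA array st.1)
               ([PySem.List.pyGetD array st.2.2 0], st.2.2)
  res.1

-- ===== PORT B =====
def dpStepB (array : List Int) (st : List Int × List Int) (i : Int) : List Int × List Int :=
  let pos := PySem.List.bisectLeft st.1 (PySem.List.pyGetD array i 0)
  let f := PySem.List.pySetD st.2 i ((pos : Int) + 1)
  let tails := if pos = st.1.length then st.1 ++ [PySem.List.pyGetD array i 0]
               else st.1.set pos (PySem.List.pyGetD array i 0)
  (tails, f)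

def bestStepB (f : List Int) (best : Int) (i : Int) : Int :=
  if PySem.List.pyGetD f i 0 > PySem.List.pyGetD f best 0 then i else best

def greedyStepB (array f : List Int) (st : List Int × Int) (i : Int) : List Int × Int :=
  if PySem.List.pyGetD array i 0 < PySem.List.pyGetD st.1 (-1) 0 ∧
     PySem.List.pyGetD f i 0 = PySem.List.pyGetD f st.2 0 - 1 then
    (st.1 ++ [PySem.List.pyGetD array i 0], i)
  else (st.1, st.2)

def findMax0_alt (array : List Int) : List Int :=
  let n : Int := (array.length : Int)
  let st := (PySem.List.pyRange (n - 1) (-1) (-1)).foldl (dpStepB array)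
              ([], List.replicate array.length 0)
  let best := (PySem.List.pyRange (n - 2) (-1) (-1)).foldl (bestStepB st.2) (n - 1)
  let res := (PySem.List.pyRange (best + 1) n 1).foldl (greedyStepB array st.2)
               ([PySem.List.pyGetD array best 0], best)
  res.1

-- ===== PRECONDITION & SPEC =====
-- Pre_ excludes only the empty list, on which A raises IndexError (array[firstIndex] with firstIndex = -1 on no elements).
def Pre_findMax0 (array : List Int) : Prop := array ≠ []
instance (array : List Int) : Decidable (Pre_findMax0 array) := by unfold Pre_findMax0; infer_instance
def pvWitness_findMax0 : List Int := [3, 1, 2]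

def Spec_findMax0 (array : List Int) (out : List Int) : Prop := out = findMax0_alt array
instance (array : List Int) (out : List Int) : Decidable (Spec_findMax0 array out) := by unfold Spec_findMax0; infer_instance

-- ===== CLAIM (what is proved, stated in full; the proofs are below) =====
def Claim_equal_findMax0 : Prop := ∀ (array : List Int), Dom_findMax0 array → Pre_findMax0 array → Spec_findMax0 array (findMax0 array)

-- ===== LEMMAS AND PROOFS =====

-- `bestUnder x zs` = max length among pairs (value, length) with value < x (0 if none)
def bestUnder (x : Int) : List (Int × Int) → Int
  | [] => 0
  | p :: t => if p.1 < x then max p.2 (bestUnder x t) else bestUnder x t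

-- `F a` : for each position i, the length of the longest strictly decreasing subsequence of a starting at i
def F : List Int → List Int
  | [] => []
  | x :: r => (1 + bestUnder x (r.zip (F r))) :: F r

-- the tails structure B maintains, as a pure function of the suffix
def T : List Int → List Int
  | [] => []
  | x :: r =>
    let t := T r
    let pos := PySem.List.bisectLeft t x
    if pos = t.length then t ++ [x] else t.set pos x

def omin (v : Int) : Option Int → Option Int
  | none => some v
  | some m => some (min v m)

-- minimal value among pairs with length ≥ L
def minGe (L : Int) : List (Int × Int) → Option Int
  | [] => none
  | p :: t => if L ≤ p.2 then omin p.1 (minGe L t) else minGe L t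

theorem bestUnder_nonneg (x : Int) (zs : List (Int × Int)) : 0 ≤ bestUnder x zs := by
  induction zs with
  | nil => simp [bestUnder]
  | cons p t ih => simp only [bestUnder]; split <;> omega

theorem F_length (a : List Int) : (F a).length = a.length := by
  induction a with
  | nil => rfl
  | cons x r ih => simp [F, ih]
theorem F_drop (a : List Int) (k : Nat) : (F a).drop k = F (a.drop k) := by
  induction a generalizing k with
  | nil => simp [F]
  | cons x r ih =>
    cases k with
    | zero => rfl
    | succ k => simpa [F] using ih k

theorem F_getElem (a : List Int) (k : Nat) (hk : k < a.length) :
    (F a)[k]'(by rw [F_length]; exact hk) =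
      1 + bestUnder (a[k]) ((a.drop (k+1)).zip ((F a).drop (k+1))) := by
  induction a generalizing k with
  | nil => simp at hk
  | cons x r ih =>
    cases k with
    | zero => simp [F, F_drop]
    | succ k =>
      have hk' : k < r.length := by simpa using hk
      have h2 := ih k hk'
      rw [F_drop] at h2 ⊢
      simpa [F] using h2

theorem F_last (a : List Int) (h : a ≠ []) : (F a).drop (a.length - 1) = [1] := by
  induction a with
  | nil => simp at h
  | cons x r ih =>
    cases r with
    | nil => simp [F, bestUnder]
    | cons y t =>
      have := ih (by simp)
      simp only [F, List.length_cons]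
      simpa [F] using this

theorem fold_pairs (x : Int) (zs : List (Int × Int)) : ∀ (b : Int), 0 ≤ b →
    zs.foldl (fun c p => if p.1 < x ∧ p.2 ≥ c then p.2 + 1 else c) (1 + b)
      = 1 + max b (bestUnder x zs) := by
  induction zs with
  | nil => intro b hb; simp [bestUnder]; omega
  | cons p t ih =>
    intro b hb
    simp only [List.foldl_cons, bestUnder]
    by_cases h1 : p.1 < x
    · by_cases h2 : p.2 ≥ 1 + b
      · rw [if_pos ⟨h1, h2⟩]
        have : p.2 + 1 = 1 + max b p.2 := by omega
        rw [this, ih (max b p.2) (by omega), if_pos h1]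
        omega
      · rw [if_neg (by tauto)]
        rw [ih b hb, if_pos h1]
        have : max b p.2 = b := by omega
        omega
    · rw [if_neg (by tauto), ih b hb, if_neg h1]

theorem minGe_mono (L L' : Int) (hL : L ≤ L') (zs : List (Int × Int)) (m' : Int)
    (h : minGe L' zs = some m') : ∃ m, minGe L zs = some m ∧ m ≤ m' := by
  induction zs generalizing m' with
  | nil => simp [minGe] at h
  | cons p t ih =>
    simp only [minGe] at h ⊢
    by_cases h2 : L' ≤ p.2
    · rw [if_pos h2] at h
      rw [if_pos (le_trans hL h2)]
      cases ht : minGe L' t with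
      | none =>
        rw [ht] at h; simp [omin] at h
        cases ht2 : minGe L t with
        | none => exact ⟨p.1, by simp [omin], by omega⟩
        | some m2 => exact ⟨min p.1 m2, by simp [omin], by simp [omin] at *; omega⟩
      | some mt =>
        rw [ht] at h; simp [omin] at h
        obtain ⟨m2, hm2, hle2⟩ := ih mt ht
        rw [hm2]; exact ⟨min p.1 m2, by simp [omin], by simp; omega⟩
    · rw [if_neg h2] at h
      obtain ⟨m2, hm2, hle2⟩ := ih m' h
      by_cases h3 : L ≤ p.2
      · rw [if_pos h3, hm2]; exact ⟨min p.1 m2, by simp [omin], by simp; omega⟩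
      · rw [if_neg h3, hm2]; exact ⟨m2, rfl, hle2⟩

theorem minGe_witness (L : Int) (zs : List (Int × Int)) (m : Int)
    (h : minGe L zs = some m) : ∃ p ∈ zs, p.1 = m ∧ L ≤ p.2 := by
  induction zs generalizing m with
  | nil => simp [minGe] at h
  | cons p t ih =>
    simp only [minGe] at h
    by_cases h2 : L ≤ p.2
    · rw [if_pos h2] at h
      cases ht : minGe L t with
      | none => rw [ht] at h; simp [omin] at h; exact ⟨p, by simp, by omega, h2⟩
      | some mt =>
        rw [ht] at h; simp [omin] at h
        rcases le_total p.1 mt with hc | hc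
        · exact ⟨p, by simp, by omega, h2⟩
        · obtain ⟨q, hq, hq1, hq2⟩ := ih mt ht
          exact ⟨q, by simp [hq], by omega, hq2⟩
    · rw [if_neg h2] at h
      obtain ⟨q, hq, hq1, hq2⟩ := ih m h
      exact ⟨q, by simp [hq], hq1, hq2⟩

theorem minGe_le_of_mem (L : Int) (zs : List (Int × Int)) (p : Int × Int)
    (hp : p ∈ zs) (hL : L ≤ p.2) : ∃ m, minGe L zs = some m ∧ m ≤ p.1 := by
  induction zs with
  | nil => simp at hp
  | cons q t ih =>
    simp only [minGe]
    rcases List.mem_cons.mp hp with rfl | hp'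
    · rw [if_pos hL]
      cases ht : minGe L t with
      | none => exact ⟨p.1, by simp [omin], le_refl _⟩
      | some mt => exact ⟨min p.1 mt, by simp [omin], by simp⟩
    · obtain ⟨m2, hm2, hle2⟩ := ih hp'
      by_cases h3 : L ≤ q.2
      · rw [if_pos h3, hm2]; exact ⟨min q.1 m2, by simp [omin], by simp; omega⟩
      · rw [if_neg h3, hm2]; exact ⟨m2, rfl, hle2⟩

theorem bestUnder_ge (x : Int) (zs : List (Int × Int)) (p : Int × Int)
    (hp : p ∈ zs) (hx : p.1 < x) : p.2 ≤ bestUnder x zs := by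
  induction zs with
  | nil => simp at hp
  | cons q t ih =>
    simp only [bestUnder]
    rcases List.mem_cons.mp hp with rfl | hp'
    · rw [if_pos hx]; exact le_max_left _ _
    · have := ih hp'; split <;> omega

theorem bestUnder_attained (x : Int) (zs : List (Int × Int)) (h : 0 < bestUnder x zs) :
    ∃ p ∈ zs, p.1 < x ∧ p.2 = bestUnder x zs := by
  induction zs with
  | nil => simp [bestUnder] at h
  | cons q t ih =>
    simp only [bestUnder] at h ⊢
    by_cases h1 : q.1 < x
    · rw [if_pos h1] at h ⊢
      rcases le_total q.2 (bestUnder x t) with hc | hc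
      · obtain ⟨p, hp, hp1, hp2⟩ := ih (by omega)
        exact ⟨p, by simp [hp], hp1, by omega⟩
      · exact ⟨q, by simp, h1, by omega⟩
    · rw [if_neg h1] at h ⊢
      obtain ⟨p, hp, hp1, hp2⟩ := ih h
      exact ⟨p, by simp [hp], hp1, hp2⟩

theorem pairwise_of_inv (t : List Int) (zs : List (Int × Int))
    (hinv : ∀ L : Nat, t[L]? = minGe ((L : Int) + 1) zs) : t.Pairwise (· ≤ ·) := by
  rw [List.pairwise_iff_getElem]
  intro i j hi hj hij
  have hji := hinv j
  rw [List.getElem?_eq_getElem hj] at hji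
  obtain ⟨m, hm, hle⟩ := minGe_mono ((i : Int) + 1) ((j : Int) + 1) (by omega) zs _ hji.symm
  have hii := hinv i
  rw [List.getElem?_eq_getElem hi, hm] at hii
  have := Option.some.inj hii
  omega

theorem bisect_of_inv (t : List Int) (zs : List (Int × Int)) (x : Int)
    (hinv : ∀ L : Nat, t[L]? = minGe ((L : Int) + 1) zs) :
    ((PySem.List.bisectLeft t x : Nat) : Int) = bestUnder x zs := by
  obtain ⟨hle, hlt, hge⟩ := PySem.List.bisectLeft_spec t x (pairwise_of_inv t zs hinv)
  set P := PySem.List.bisectLeft t x with hP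
  have h1 : (P : Int) ≤ bestUnder x zs := by
    cases hP0 : P with
    | zero => simpa [hP0] using bestUnder_nonneg x zs
    | succ P' =>
      have hP'len : P' < t.length := by omega
      have htP' : t[P'] < x := hlt P' hP'len (by omega)
      have := hinv P'
      rw [List.getElem?_eq_getElem hP'len] at this
      obtain ⟨p, hp, hp1, hp2⟩ := minGe_witness _ _ _ this.symm
      have := bestUnder_ge x zs p hp (by omega)
      omega
  have h2 : bestUnder x zs ≤ (P : Int) := by
    by_contra hc
    push_neg at hc
    obtain ⟨p, hp, hp1, hp2⟩ := bestUnder_attained x zs (by omega)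
    obtain ⟨m, hm, hmle⟩ := minGe_le_of_mem ((P : Int) + 1) zs p hp (by omega)
    have := hinv P
    rw [hm] at this
    by_cases hPl : P < t.length
    · rw [List.getElem?_eq_getElem hPl] at this
      have h5 := Option.some.inj this
      have h6 := hge P hPl (le_refl _)
      omega
    · rw [List.getElem?_eq_none (by omega)] at this
      simp at this
  omega

theorem T_inv (r : List Int) (L : Nat) :
    (T r)[L]? = minGe ((L : Int) + 1) (r.zip (F r)) := by
  induction r generalizing L with
  | nil => simp [T, minGe, F]
  | cons x r ih =>
    have hB := bisect_of_inv (T r) (r.zip (F r)) x ih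
    set t := T r with ht
    set P := PySem.List.bisectLeft t x with hPdef
    set B := bestUnder x (r.zip (F r)) with hBdef
    obtain ⟨hle, hlt, hge⟩ := PySem.List.bisectLeft_spec t x (pairwise_of_inv t _ ih)
    have hzip : (x :: r).zip (F (x :: r)) = (x, 1 + B) :: r.zip (F r) := by
      simp [F]
      rw [hBdef]
    rw [hzip]
    have hT : T (x :: r) = if P = t.length then t ++ [x] else t.set P x := rfl
    rw [hT]
    simp only [minGe]
    rcases lt_trichotomy L P with hc | hc | hc
    · -- L < P : entry unchanged, and it is < x so the min with x keeps it
      have hLlen : L < t.length := by omega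
      have htL : t[L] < x := hlt L hLlen hc
      have hcond : (L : Int) + 1 ≤ (x, 1 + B).2 := by simp; omega
      rw [if_pos hcond, ← ih]
      rw [List.getElem?_eq_getElem hLlen]
      have hidx : (if P = t.length then t ++ [x] else t.set P x)[L]? = some t[L] := by
        split
        · rw [List.getElem?_append_left hLlen, List.getElem?_eq_getElem hLlen]
        · rw [List.getElem?_set_ne (by omega), List.getElem?_eq_getElem hLlen]
      rw [hidx]
      simp [omin]
      omega
    · -- L = P : the new entry is x
      have hcond : (L : Int) + 1 ≤ (x, 1 + B).2 := by simp; omega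
      rw [if_pos hcond, ← ih]
      by_cases hPl : P = t.length
      · rw [if_pos hPl]
        have hx : (t ++ [x])[L]? = some x := by
          rw [List.getElem?_append_right (by omega)]
          simp [show L - t.length = 0 from by omega]
        have e2 : t[L]? = none := List.getElem?_eq_none (by omega)
        rw [hx, e2]; simp [omin]
      · rw [if_neg hPl]
        have hLlen : L < t.length := by omega
        have hxle : x ≤ t[L] := hge L hLlen (by omega)
        rw [List.getElem?_eq_getElem hLlen]
        have hset : (t.set P x)[L]? = some x := by
          rw [hc]
          exact List.getElem?_set_self (by omega)
        rw [hset]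
        simp [omin]
        omega
    · -- L > P : unchanged, and the new pair's length 1 + B = 1 + P < L + 1
      have hcond : ¬ ((L : Int) + 1 ≤ (x, 1 + B).2) := by simp; omega
      rw [if_neg hcond, ← ih]
      split
      · next hPl =>
        have e1 : (t ++ [x])[L]? = none := List.getElem?_eq_none (by simp; omega)
        have e2 : t[L]? = none := List.getElem?_eq_none (by omega)
        rw [e1, e2]
      · rw [List.getElem?_set_ne (by omega)]

theorem bisect_T (r : List Int) (x : Int) :
    ((PySem.List.bisectLeft (T r) x : Nat) : Int) = bestUnder x (r.zip (F r)) :=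
  bisect_of_inv (T r) (r.zip (F r)) x (T_inv r)

theorem repl_set' (c v : Int) (X : List Int) (k : Nat) :
    (List.replicate (k+1) c ++ X).set k v = List.replicate k c ++ v :: X := by
  induction k with
  | zero => simp
  | succ k ih => simpa [List.replicate_succ] using ih

theorem repl_read (c : Int) (X : List Int) (K j : Nat) (hK : K ≤ j) (hj : j - K < X.length) :
    (List.replicate K c ++ X).getD j 0 = X[j - K] := by
  have hlen : j < (List.replicate K c ++ X).length := by simp; omega
  rw [List.getD_eq_getElem _ _ hlen, List.getElem_append_right (by simp; omega)]
  simp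

theorem inner_extract (a m : List Int) (k : Nat) (hk : k < m.length) :
    ∀ (js : List Int), (∀ j ∈ js, (k : Int) < j) → ∀ c : Int,
    js.foldl (innerStepA a ↑k) (PySem.List.pySetD m ↑k c)
      = PySem.List.pySetD m ↑k (js.foldl (fun c' j =>
          if PySem.List.pyGetD a j 0 < PySem.List.pyGetD a ↑k 0 ∧ PySem.List.pyGetD m j 0 ≥ c'
          then PySem.List.pyGetD m j 0 + 1 else c') c) := by
  intro js
  induction js with
  | nil => intro _ c; simp
  | cons j js ih =>
    intro hmem c
    have hkj : (k : Int) < j := hmem j (by simp)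
    have hq : j = ((j.toNat : Nat) : Int) := (Int.toNat_of_nonneg (by omega)).symm
    simp only [List.foldl_cons]
    have h1 : innerStepA a ↑k (PySem.List.pySetD m ↑k c) j =
        PySem.List.pySetD m ↑k (if PySem.List.pyGetD a j 0 < PySem.List.pyGetD a ↑k 0 ∧
            PySem.List.pyGetD m j 0 ≥ c then PySem.List.pyGetD m j 0 + 1 else c) := by
      unfold innerStepA
      rw [hq, PySem.List.pyGetD_pySetD_natCast m k j.toNat c 0 hk,
        PySem.List.pyGetD_pySetD_natCast m k k c 0 hk]
      rw [if_neg (show ¬ (j.toNat = k) from by omega), if_pos (show k = k from rfl)]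
      split
      · simp [PySem.List.pySetD_natCast, List.set_set]
      · rfl
    rw [h1]
    exact ih (fun j hj => hmem j (by simp [hj])) _

theorem scalar_conv (a m : List Int) (X : Int) (hm : m.length = a.length) (k1 : Nat) (c : Int) :
    (PySem.List.pyRange ↑k1 (a.length : Int) 1).foldl (fun c' j =>
        if PySem.List.pyGetD a j 0 < X ∧ PySem.List.pyGetD m j 0 ≥ c'
        then PySem.List.pyGetD m j 0 + 1 else c') c
      = ((a.drop k1).zip (m.drop k1)).foldl (fun c' p =>
          if p.1 < X ∧ p.2 ≥ c' then p.2 + 1 else c') c := by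
  have hmap : (PySem.List.pyRange ↑k1 (a.length : Int) 1).map
      (fun j => (PySem.List.pyGetD a j 0, PySem.List.pyGetD m j 0)) = (a.drop k1).zip (m.drop k1) := by
    rw [← List.zip_map' (f := fun j => PySem.List.pyGetD a j 0)
        (g := fun j => PySem.List.pyGetD m j 0) (l := PySem.List.pyRange ↑k1 (a.length : Int) 1)]
    congr 1
    · have := PySem.List.map_pyGetD_pyRange' a 0 (a := (k1 : Int)) (by positivity)
      simpa using this
    · have := PySem.List.map_pyGetD_pyRange' m 0 (a := (k1 : Int)) (by positivity)
      rw [hm] at this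
      simpa using this
  rw [← hmap, List.foldl_map]

theorem fold_pairs1 (x : Int) (zs : List (Int × Int)) :
    zs.foldl (fun c p => if p.1 < x ∧ p.2 ≥ c then p.2 + 1 else c) (1 : Int)
      = 1 + bestUnder x zs := by
  have h := fold_pairs x zs 0 (le_refl 0)
  rw [show (1 : Int) + 0 = 1 from by ring] at h
  rw [max_eq_right (bestUnder_nonneg x zs)] at h
  exact h

theorem A_outer (a : List Int) : ∀ (k : Nat), k ≤ a.length → ∀ (mx fi : Int),
    (PySem.List.pyRange ((k : Int) - 1) (-1) (-1)).foldl (outerStepA a)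
        (List.replicate k 1 ++ (F a).drop k, mx, fi)
      = (F a, (PySem.List.pyRange ((k : Int) - 1) (-1) (-1)).foldl
          (fun s i => if PySem.List.pyGetD (F a) i 0 > s.1 then (PySem.List.pyGetD (F a) i 0, i) else s)
          (mx, fi)) := by
  intro k
  induction k with
  | zero =>
    intro _ mx fi
    rw [PySem.List.pyRange_neg_one_eq_nil (by omega)]
    simp
  | succ k ih =>
    intro hk mx fi
    have hka : k < a.length := by omega
    have hkF : k < (F a).length := by rw [F_length]; exact hka
    have hcast : ((k + 1 : Nat) : Int) - 1 = (k : Int) := by push_cast; ring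
    rw [hcast, PySem.List.pyRange_neg_one_cons (by omega)]
    simp only [List.foldl_cons]
    -- the inner loop at index k
    set m0 := List.replicate (k+1) (1 : Int) ++ (F a).drop (k+1) with hm0
    have hm0len : m0.length = a.length := by
      rw [hm0]; simp [F_length]; omega
    have hkm0 : k < m0.length := by omega
    have hrep : ∀ (X : List Int), List.replicate (k+1) (1 : Int) ++ X = List.replicate k 1 ++ 1 :: X := by
      intro X
      rw [List.replicate_succ', List.append_assoc]
      rfl
    have hinner : (PySem.List.pyRange ↑k (a.length : Int) 1).foldl (innerStepA a ↑k) m0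
        = List.replicate k 1 ++ (F a).drop k := by
      rw [PySem.List.pyRange_one_cons (by omega)]
      simp only [List.foldl_cons]
      have hfirst : innerStepA a ↑k m0 ↑k = m0 := by
        unfold innerStepA
        rw [if_neg]
        rintro ⟨h1, -⟩
        exact lt_irrefl _ h1
      rw [hfirst]
      have hm0k : m0 = PySem.List.pySetD m0 ↑k 1 := by
        rw [PySem.List.pySetD_natCast, hm0, repl_set' 1 1 _ k, hrep]
      conv_lhs => rw [hm0k]
      rw [inner_extract a m0 k hkm0 _
        (fun j hj => by
          have := (PySem.List.mem_pyRange_one).mp hj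
          omega) 1]
      rw [show ((k : Int) + 1) = ((k + 1 : Nat) : Int) from by push_cast; ring]
      rw [scalar_conv a m0 (PySem.List.pyGetD a ↑k 0) hm0len (k+1) 1]
      have hm0drop : m0.drop (k+1) = (F a).drop (k+1) := by
        rw [hm0]
        have := List.drop_left (l₁ := List.replicate (k+1) (1:Int)) (l₂ := (F a).drop (k+1))
        simpa using this
      rw [hm0drop, fold_pairs1]
      have hak : PySem.List.pyGetD a ↑k 0 = a[k] := by
        rw [PySem.List.pyGetD_natCast]
        exact List.getD_eq_getElem a 0 hka
      rw [hak, ← F_getElem a k hka]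
      rw [PySem.List.pySetD_natCast, hm0, repl_set']
      rw [← List.drop_eq_getElem_cons hkF]
    have hread : PySem.List.pyGetD (List.replicate k 1 ++ (F a).drop k) ↑k 0 = (F a)[k] := by
      rw [PySem.List.pyGetD_natCast, repl_read 1 _ k k (le_refl k) (by simp; omega)]
      simp [List.getElem_drop]
    have hreadF : PySem.List.pyGetD (F a) ↑k 0 = (F a)[k] := by
      rw [PySem.List.pyGetD_natCast]
      exact List.getD_eq_getElem (F a) 0 hkF
    show (PySem.List.pyRange ((k:Int) - 1) (-1) (-1)).foldl (outerStepA a)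
        (outerStepA a (m0, mx, fi) ↑k) = _
    rw [show outerStepA a (m0, mx, fi) ↑k
        = if (F a)[k] > mx then (List.replicate k 1 ++ (F a).drop k, (F a)[k], (k:Int))
          else (List.replicate k 1 ++ (F a).drop k, mx, fi) from by
      unfold outerStepA
      simp only [hinner, hread]]
    rw [hreadF]
    split
    · rw [ih (by omega) ((F a)[k]) (k:Int)]
    · rw [ih (by omega) mx fi]


theorem B_loop (a : List Int) : ∀ (k : Nat), k ≤ a.length →
    (PySem.List.pyRange ((k : Int) - 1) (-1) (-1)).foldl (dpStepB a)
        (T (a.drop k), List.replicate k 0 ++ (F a).drop k)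
      = (T a, F a) := by
  intro k
  induction k with
  | zero =>
    intro _
    rw [PySem.List.pyRange_neg_one_eq_nil (by omega)]
    simp
  | succ k ih =>
    intro hk
    have hka : k < a.length := by omega
    have hkF : k < (F a).length := by rw [F_length]; exact hka
    have hcast : ((k + 1 : Nat) : Int) - 1 = (k : Int) := by push_cast; ring
    rw [hcast, PySem.List.pyRange_neg_one_cons (by omega)]
    simp only [List.foldl_cons]
    have hak : PySem.List.pyGetD a ↑k 0 = a[k] := by
      rw [PySem.List.pyGetD_natCast]
      exact List.getD_eq_getElem a 0 hka
    have hstep : dpStepB a (T (a.drop (k+1)), List.replicate (k+1) 0 ++ (F a).drop (k+1)) ↑k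
        = (T (a.drop k), List.replicate k 0 ++ (F a).drop k) := by
      unfold dpStepB
      simp only [hak]
      have hpos : ((PySem.List.bisectLeft (T (a.drop (k+1))) (a[k]) : Nat) : Int) + 1 = (F a)[k] := by
        rw [bisect_T, F_getElem a k hka, F_drop]
        ring
      rw [hpos]
      have hf : PySem.List.pySetD (List.replicate (k+1) 0 ++ (F a).drop (k+1)) ↑k ((F a)[k])
          = List.replicate k 0 ++ (F a).drop k := by
        rw [PySem.List.pySetD_natCast, repl_set']
        rw [← List.drop_eq_getElem_cons hkF]
      rw [hf]
      have ht : (if PySem.List.bisectLeft (T (a.drop (k+1))) (a[k]) = (T (a.drop (k+1))).length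
            then T (a.drop (k+1)) ++ [a[k]]
            else (T (a.drop (k+1))).set (PySem.List.bisectLeft (T (a.drop (k+1))) (a[k])) (a[k]))
          = T (a.drop k) := by
        rw [List.drop_eq_getElem_cons hka]
        rfl
      rw [ht]
    rw [hstep]
    exact ih (by omega)

theorem sel_eq (fa : List Int) : ∀ (js : List Int) (mx fi : Int),
    mx = PySem.List.pyGetD fa fi 0 →
    js.foldl (fun s i => if PySem.List.pyGetD fa i 0 > s.1 then (PySem.List.pyGetD fa i 0, i) else s) (mx, fi)
      = (PySem.List.pyGetD fa (js.foldl (bestStepB fa) fi) 0, js.foldl (bestStepB fa) fi) := by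
  intro js
  induction js with
  | nil => intro mx fi h; simp [h]
  | cons j js ih =>
    intro mx fi h
    simp only [List.foldl_cons, bestStepB]
    rw [h]
    split
    · exact ih _ _ rfl
    · exact ih _ _ rfl


-- ===== VERDICT (by name: the statement is the Claim_ definition above) =====
theorem findMax0_spec : Claim_equal_findMax0 := by
  intro a _ hpre
  unfold Spec_findMax0
  have hn : 1 ≤ a.length := List.length_pos_iff.mpr hpre
  have hd1 : (F a).drop (a.length - 1) = [1] := F_last a hpre
  have hrep1 : List.replicate (a.length - 1) (1 : Int) ++ (F a).drop (a.length - 1)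
      = List.replicate a.length 1 := by
    rw [hd1, ← List.replicate_succ' (n := a.length - 1) (a := (1 : Int)),
      show (a.length - 1) + 1 = a.length from by omega]
  have hcast2 : ((a.length - 1 : Nat) : Int) - 1 = (a.length : Int) - 2 := by omega
  have hA := A_outer a (a.length - 1) (by omega) 1 ((a.length : Int) - 1)
  rw [hcast2, hrep1] at hA
  have hlenF : a.length - 1 < (F a).length := by rw [F_length]; omega
  have hfa1 : PySem.List.pyGetD (F a) ((a.length : Int) - 1) 0 = 1 := by
    rw [show ((a.length : Int) - 1) = ((a.length - 1 : Nat) : Int) from by omega,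
      PySem.List.pyGetD_natCast, List.getD_eq_getElem (F a) 0 hlenF]
    have h2 : (F a)[a.length - 1] = ((F a).drop (a.length - 1))[0]'(by rw [hd1]; simp) := by
      rw [List.getElem_drop]
      simp
    rw [h2]
    simp [hd1]
  have hsel := sel_eq (F a) (PySem.List.pyRange ((a.length : Int) - 2) (-1) (-1)) 1
    ((a.length : Int) - 1) hfa1.symm
  rw [hsel] at hA
  have hB := B_loop a a.length (le_refl _)
  rw [List.drop_length, show ((F a).drop a.length) = [] from by
      rw [← F_length a]; exact List.drop_length, List.append_nil,
    show T [] = [] from rfl] at hB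
  have hg : greedyStepA = greedyStepB := rfl
  unfold findMax0 findMax0_alt
  simp only [hA, hB, hg]
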